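-- pv_equiv track=rewrite | github.com/trinabhgarg/Data-Comp | basic.py | order_data
-- ===== SOURCE A (Python) =====
-- def order_data(n):
--     """This function returns a string of length n having only 2 elements A and B"""
--     s=''  # pre-defining the empty string that will contain the ans
--     for i in range(n//2):  # in the first half of string length
--         if i%7==0:
--             s+=' '
--         else:
--             s+='A'  # assign 'A' to all the indices
--     for i in range(n//2):  # in the remaining second half of string length
--         if i%7==0:
--             s+=' '
--         else:
--             s+='B'  # assign 'B' to all the indices
--     return s
-- ===== SOURCE B (Python) =====
-- def order_data(n):
--     """This function returns a string of length n having only 2 elements A and B"""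
--     half = n // 2
--     reps = half // 7 + 1
--     first = (' ' + 'A' * 6) * reps
--     second = (' ' + 'B' * 6) * reps
--     return first[:half] + second[:half]
-- ===== Notes on version B (the rewrite author's own statement) =====
-- stated objective: faster
-- what changed: Replaces the two per-character conditional append loops with block multiplication: each half is a constant seven-character period (space plus six fill letters) repeated enough times and sliced to half the requested length.
import Mathlib
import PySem

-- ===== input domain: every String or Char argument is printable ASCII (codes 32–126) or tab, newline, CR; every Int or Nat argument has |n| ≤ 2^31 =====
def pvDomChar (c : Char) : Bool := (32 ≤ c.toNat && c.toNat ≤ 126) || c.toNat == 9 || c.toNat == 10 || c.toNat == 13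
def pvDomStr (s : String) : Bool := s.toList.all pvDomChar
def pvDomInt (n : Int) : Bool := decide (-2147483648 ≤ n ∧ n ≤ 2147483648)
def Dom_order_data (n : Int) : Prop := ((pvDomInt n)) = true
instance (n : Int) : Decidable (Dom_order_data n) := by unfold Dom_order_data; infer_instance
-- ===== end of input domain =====

-- B replaces A's two per-character conditional loops by block repetition and slicing (objective: simpler).

-- ===== PORT A =====
-- the per-character append loop, once per half ('A' then 'B')
def order_data (n : Int) : String :=
  let s : List Char := []
  let s := (PySem.List.pyRange 0 (PySem.Int.floordiv n 2) 1).foldl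
    (fun s i => if PySem.Int.mod i 7 == 0 then s ++ [' '] else s ++ ['A']) s
  let s := (PySem.List.pyRange 0 (PySem.Int.floordiv n 2) 1).foldl
    (fun s i => if PySem.Int.mod i 7 == 0 then s ++ [' '] else s ++ ['B']) s
  String.ofList s

-- ===== PORT B =====
def order_data_alt (n : Int) : String :=
  let half := PySem.Int.floordiv n 2
  let reps := PySem.Int.floordiv half 7 + 1
  let first := PySem.List.pyRepeat ([' '] ++ PySem.List.pyRepeat ['A'] 6) reps
  let second := PySem.List.pyRepeat ([' '] ++ PySem.List.pyRepeat ['B'] 6) reps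
  String.ofList (PySem.List.slice first none (some half) ++ PySem.List.slice second none (some half))

-- ===== PRECONDITION & SPEC =====
def Spec_order_data (n : Int) (out : String) : Prop := out = order_data_alt n
instance (n : Int) (out : String) : Decidable (Spec_order_data n out) := by unfold Spec_order_data; infer_instance

-- ===== CLAIM (what is proved, stated in full; the proofs are below) =====
def Claim_equal_order_data : Prop := ∀ (n : Int), Dom_order_data n → Spec_order_data n (order_data n)

-- ===== LEMMAS AND PROOFS =====

-- position character: space at multiples of 7, the fill letter elsewhere
def pvFill (c : Char) (j : Nat) : Char := if j % 7 == 0 then ' ' else c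

-- one period block of B equals seven consecutive fill characters
theorem pv_block_eq (c : Char) (K : Nat) :
    (List.range 7).map (fun j => pvFill c (7 * K + j)) = [' '] ++ PySem.List.pyRepeat [c] 6 := by
  simp [List.range_succ, pvFill, PySem.List.pyRepeat, List.replicate]

-- the repeated block spells out the fill pattern over 7*K positions
theorem pv_repeat_eq (c : Char) (K : Nat) :
    PySem.List.pyRepeat ([' '] ++ PySem.List.pyRepeat [c] 6) ((K : Int)) =
      (List.range (7 * K)).map (pvFill c) := by
  induction K with
  | zero => simp [PySem.List.pyRepeat]
  | succ K ih =>
    have : PySem.List.pyRepeat ([' '] ++ PySem.List.pyRepeat [c] 6) ((K + 1 : Nat) : Int) =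
        PySem.List.pyRepeat ([' '] ++ PySem.List.pyRepeat [c] 6) ((K : Nat) : Int) ++
          ([' '] ++ PySem.List.pyRepeat [c] 6) := by
      simp [PySem.List.pyRepeat, List.replicate_succ', List.flatten_append]
    rw [this, ih, ← pv_block_eq c K]
    have hr : 7 * (K + 1) = 7 * K + 7 := by ring
    rw [hr, List.range_add, List.map_append, List.map_map]
    rfl

-- each half of A is the fill pattern over its range
theorem pv_loop_eq (c : Char) (m : Int) (acc : List Char) :
    (PySem.List.pyRange 0 m 1).foldl
      (fun s i => if PySem.Int.mod i 7 == 0 then s ++ [' '] else s ++ [c]) acc =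
      acc ++ (List.range m.toNat).map (pvFill c) := by
  have hf : (fun (s : List Char) (i : Int) =>
      if PySem.Int.mod i 7 == 0 then s ++ [' '] else s ++ [c]) =
      (fun s i => s ++ [if PySem.Int.mod i 7 == 0 then ' ' else c]) := by
    funext s i; split <;> simp_all
  rw [hf, PySem.List.foldl_append_singleton_eq_map, PySem.List.pyRange_one, List.map_map]
  simp only [Int.sub_zero]
  congr 1
  apply List.map_congr_left
  intro j _
  have hd : (7:Int) ∣ (j:Int) ↔ j % 7 = 0 := by omega
  simp [pvFill, hd]

-- each half of B is the same fill pattern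
theorem pv_half_eq (c : Char) (m : Int) :
    PySem.List.slice
        (PySem.List.pyRepeat ([' '] ++ PySem.List.pyRepeat [c] 6) (PySem.Int.floordiv m 7 + 1))
        none (some m) =
      (List.range m.toNat).map (pvFill c) := by
  rcases le_or_gt 0 m with hm | hm
  · obtain ⟨M, rfl⟩ := Int.eq_ofNat_of_zero_le hm
    have hk : PySem.Int.floordiv (M : Int) 7 + 1 = ((M / 7 + 1 : Nat) : Int) := by
      rw [show ((7:Int)) = ((7:Nat):Int) from rfl, PySem.Int.floordiv_natCast]; push_cast; ring
    rw [hk, pv_repeat_eq, PySem.List.slice_to_natCast, ← List.map_take, List.take_range]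
    have : min M (7 * (M / 7 + 1)) = M := by omega
    simp [this]
  · have hb : PySem.List.pyRepeat ([' '] ++ PySem.List.pyRepeat [c] 6)
        (PySem.Int.floordiv m 7 + 1) = ([] : List Char) := by
      simp [PySem.List.pyRepeat]
      omega
    have hmn : m.toNat = 0 := by omega
    rw [hb, hmn]
    simp [PySem.List.slice, PySem.List.clampIdx]

-- ===== VERDICT (by name: the statement is the Claim_ definition above) =====
theorem order_data_spec : Claim_equal_order_data := by
  intro n _
  unfold Spec_order_data order_data order_data_alt
  dsimp only
  rw [pv_loop_eq, pv_loop_eq, pv_half_eq, pv_half_eq]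
  simp
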